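-- pv_equiv track=rewrite | github.com/PL2Z35/GameGo | app.py | board_disponible
-- ===== SOURCE A (Python) =====
-- def board_disponible(code, boardText, lista):
--     cont = 0
--     posible = ""
--     for board in lista:
--         aux = str(board).replace("(", "")
--         aux = str(aux).replace(")", "")
--         aux = str(aux).replace("'", "")
--         aux = str(aux).replace(", ", "")
--         if(cont==1):
--             return aux
--         if(aux==boardText):
--             cont = 1
--     return "nada"
-- ===== SOURCE B (Python) =====
-- def board_disponible(code, boardText, lista):
--     procesados = [str(b).replace("(", "").replace(")", "").replace("'", "").replace(", ", "")
--                   for b in lista]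
--     if boardText in procesados:
--         i = procesados.index(boardText)
--         if i + 1 < len(procesados):
--             return procesados[i + 1]
--     return "nada"
-- ===== Notes on version B (the rewrite author's own statement) =====
-- stated objective: simpler
-- what changed: Replaces the flag-on-next-iteration single pass with a precompute-then-lookup decomposition: build the normalized list once, then use index() and a bounds check to return the element after the first match.
import Mathlib
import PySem

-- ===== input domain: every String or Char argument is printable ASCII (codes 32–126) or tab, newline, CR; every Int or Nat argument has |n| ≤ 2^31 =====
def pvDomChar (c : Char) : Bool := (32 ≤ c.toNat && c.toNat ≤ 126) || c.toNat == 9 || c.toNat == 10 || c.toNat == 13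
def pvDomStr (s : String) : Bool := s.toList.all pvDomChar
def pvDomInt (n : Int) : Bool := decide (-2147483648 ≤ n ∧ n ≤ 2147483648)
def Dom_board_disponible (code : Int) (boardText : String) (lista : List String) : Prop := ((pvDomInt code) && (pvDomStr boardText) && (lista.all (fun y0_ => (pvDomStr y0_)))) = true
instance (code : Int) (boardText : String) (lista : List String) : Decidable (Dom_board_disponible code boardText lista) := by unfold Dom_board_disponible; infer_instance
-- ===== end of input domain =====

-- B replaces A's flag-on-next-iteration single pass with precompute-the-normalized-list then index()+bounds-check lookup (objective: simpler).

-- ===== PORT A =====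
-- the four-step replace chain applied to each element (shared normalization, identical in both Pythons)
def pvProc (s : String) : String :=
  PySem.Str.replace (PySem.Str.replace (PySem.Str.replace (PySem.Str.replace s "(" "") ")" "") "'" "") ", " ""

-- A's for-loop with its cont flag
def pvLoopA (boardText : String) (cont : Nat) : List String → String
  | [] => "nada"
  | board :: rest =>
    let aux := pvProc board
    if cont == 1 then aux
    else if aux == boardText then pvLoopA boardText 1 rest
    else pvLoopA boardText cont rest

def board_disponible (code : Int) (boardText : String) (lista : List String) : String :=
  pvLoopA boardText 0 lista

-- ===== PORT B =====
def board_disponible_alt (code : Int) (boardText : String) (lista : List String) : String :=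
  let procesados := lista.map pvProc
  match PySem.List.index? procesados boardText with
  | some i => if i + 1 < procesados.length then (procesados[i+1]?).getD "nada" else "nada"
  | none => "nada"

-- ===== PRECONDITION & SPEC =====
def Spec_board_disponible (code : Int) (boardText : String) (lista : List String) (out : String) : Prop := out = board_disponible_alt code boardText lista
instance (code : Int) (boardText : String) (lista : List String) (out : String) : Decidable (Spec_board_disponible code boardText lista out) := by unfold Spec_board_disponible; infer_instance

-- ===== CLAIM (what is proved, stated in full; the proofs are below) =====
def Claim_equal_board_disponible : Prop := ∀ (code : Int) (boardText : String) (lista : List String), Dom_board_disponible code boardText lista → Spec_board_disponible code boardText lista (board_disponible code boardText lista)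

-- ===== LEMMAS AND PROOFS =====

-- A's loop after the flag is set returns the normalization of the next element (or "nada")
theorem pvLoopA_one (bt : String) (l : List String) :
    pvLoopA bt 1 l = ((l.map pvProc)[0]?).getD "nada" := by
  cases l with
  | nil => rfl
  | cons x xs => simp [pvLoopA]

theorem pvLoopA_eq_alt (bt : String) (l : List String) :
    pvLoopA bt 0 l =
      match PySem.List.index? (l.map pvProc) bt with
      | some i => if i + 1 < (l.map pvProc).length then ((l.map pvProc)[i+1]?).getD "nada" else "nada"
      | none => "nada" := by
  induction l with
  | nil => rfl
  | cons x xs ih =>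
    by_cases h : pvProc x = bt
    · subst h
      simp only [pvLoopA, beq_self_eq_true, if_true]
      rw [pvLoopA_one]
      simp only [List.map_cons, PySem.List.index?_cons_self]
      rcases xs with _ | ⟨y, ys⟩ <;> simp
    · simp only [pvLoopA]
      rw [if_neg (by decide), if_neg (by simpa using h), ih, List.map_cons,
        PySem.List.index?_cons_of_ne (xs.map pvProc) h]
      cases hix : PySem.List.index? (xs.map pvProc) bt with
      | none => simp
      | some i =>
        simp only [Option.map_some]
        have hlen : (pvProc x :: xs.map pvProc).length = (xs.map pvProc).length + 1 := by simp
        by_cases hb : i + 1 < (xs.map pvProc).length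
        · rw [if_pos hb, if_pos (by omega)]
          simp [List.getElem?_cons_succ]
        · rw [if_neg hb, if_neg (by omega)]

-- ===== VERDICT (by name: the statement is the Claim_ definition above) =====
theorem board_disponible_spec : Claim_equal_board_disponible := by
  intro code bt l _
  unfold Spec_board_disponible board_disponible board_disponible_alt
  exact pvLoopA_eq_alt bt l
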